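-- pv_equiv track=rewrite | github.com/jsanford7280/Python-HTML-Checker-Program | recursion_max.py | recursion_max
-- ===== SOURCE A (Python) =====
-- def recursion_max(myList, i):
-- 	if i >= len(myList) - 1:
-- 		return myList[i]
--
-- 	else:
-- 		n = recursion_max(myList, i + 1)
--
-- 	if n > myList[i]:
-- 		return n
--
-- 	else:
-- 		return myList[i]
-- ===== SOURCE B (Python) =====
-- def recursion_max(myList, i):
--     best = myList[i]
--     for j in range(i + 1, len(myList)):
--         if myList[j] > best:
--             best = myList[j]
--     return best
-- ===== Notes on version B (the rewrite author's own statement) =====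
-- stated objective: simpler
-- what changed: Replaces the O(n)-deep recursion (compare on unwind) with a single iterative loop keeping a running best, seeded with myList[i] so the IndexError region is identical.
import Mathlib
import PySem

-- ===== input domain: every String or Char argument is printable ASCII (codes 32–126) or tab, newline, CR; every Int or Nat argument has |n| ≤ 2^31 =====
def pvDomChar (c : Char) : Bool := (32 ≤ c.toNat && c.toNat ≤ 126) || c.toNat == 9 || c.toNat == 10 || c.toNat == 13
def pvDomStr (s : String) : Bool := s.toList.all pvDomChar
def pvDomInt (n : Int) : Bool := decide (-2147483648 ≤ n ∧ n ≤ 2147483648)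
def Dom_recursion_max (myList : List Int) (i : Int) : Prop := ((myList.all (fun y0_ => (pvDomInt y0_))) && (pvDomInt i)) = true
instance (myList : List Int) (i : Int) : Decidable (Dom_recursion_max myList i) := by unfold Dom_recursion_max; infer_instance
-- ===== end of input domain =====

-- B replaces A's O(n)-deep recursion by an iterative running-best loop (same values, same IndexError region).


-- ===== PORT A =====
-- literal port of A; myList[i] is PySem.List.pyGetD (in range by Pre_)
def recursion_max (myList : List Int) (i : Int) : Int :=
  if i ≥ (myList.length : Int) - 1 then
    PySem.List.pyGetD myList i 0
  else
    let n := recursion_max myList (i + 1)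
    if n > PySem.List.pyGetD myList i 0 then n
    else PySem.List.pyGetD myList i 0
termination_by ((myList.length : Int) - 1 - i).toNat
decreasing_by omega

-- ===== PORT B =====
-- literal port of Source B: best = myList[i]; for j in range(i+1, len): if myList[j] > best: best = myList[j]
def recursion_max_alt (myList : List Int) (i : Int) : Int :=
  (PySem.List.pyRange (i + 1) (myList.length : Int) 1).foldl
    (fun best j =>
      if PySem.List.pyGetD myList j 0 > best then PySem.List.pyGetD myList j 0 else best)
    (PySem.List.pyGetD myList i 0)

-- ===== PRECONDITION & SPEC =====
-- exactly the inputs where Python A returns: i in range (Python negative indexing allowed), so no IndexError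
def Pre_recursion_max (myList : List Int) (i : Int) : Prop :=
  -(myList.length : Int) ≤ i ∧ i < (myList.length : Int)
instance (myList : List Int) (i : Int) : Decidable (Pre_recursion_max myList i) := by
  unfold Pre_recursion_max; infer_instance

def pvWitness_recursion_max : List Int × Int := ([3, 1, 4, 1], 1)

def Spec_recursion_max (myList : List Int) (i : Int) (out : Int) : Prop := out = recursion_max_alt myList i
instance (myList : List Int) (i : Int) (out : Int) : Decidable (Spec_recursion_max myList i out) := by unfold Spec_recursion_max; infer_instance

-- ===== CLAIM (what is proved, stated in full; the proofs are below) =====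
def Claim_equal_recursion_max : Prop := ∀ (myList : List Int) (i : Int), Dom_recursion_max myList i → Pre_recursion_max myList i → Spec_recursion_max myList i (recursion_max myList i)

-- ===== LEMMAS AND PROOFS =====

-- hoisting an outer "if b > a" through the running-best fold
lemma rm_foldl_hoist (g : Int → Int) (l : List Int) : ∀ a b : Int,
    l.foldl (fun best j => if g j > best then g j else best) (if b > a then b else a)
      = (if l.foldl (fun best j => if g j > best then g j else best) b > a then
          l.foldl (fun best j => if g j > best then g j else best) b else a) := by
  induction l with
  | nil => intro a b; simp
  | cons x l ih =>
    intro a b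
    simp only [List.foldl_cons]
    have hstep :
        (if g x > (if b > a then b else a) then g x else (if b > a then b else a))
          = (if (if g x > b then g x else b) > a then (if g x > b then g x else b) else a) := by
      split_ifs <;> omega
    rw [hstep, ih]

-- both ports agree for every index (out-of-range indices read the same default)
lemma rm_main (myList : List Int) : ∀ (n : Nat) (i : Int),
    ((myList.length : Int) - 1 - i).toNat ≤ n →
    recursion_max myList i = recursion_max_alt myList i := by
  intro n
  induction n with
  | zero =>
    intro i h
    have hi : (myList.length : Int) - 1 ≤ i := by omega
    rw [recursion_max, if_pos (by exact hi)]
    unfold recursion_max_alt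
    rw [PySem.List.pyRange_one_eq_nil (by omega)]
    simp
  | succ n ih =>
    intro i h
    by_cases hc : (myList.length : Int) - 1 ≤ i
    · rw [recursion_max, if_pos hc]
      unfold recursion_max_alt
      rw [PySem.List.pyRange_one_eq_nil (by omega)]
      simp
    · rw [recursion_max, if_neg (by omega)]
      simp only
      rw [ih (i + 1) (by omega)]
      unfold recursion_max_alt
      rw [PySem.List.pyRange_one_cons (by omega : i + 1 < (myList.length : Int))]
      simp only [List.foldl_cons]
      exact (rm_foldl_hoist (fun j => PySem.List.pyGetD myList j 0)
        (PySem.List.pyRange (i + 1 + 1) (myList.length : Int) 1)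
        (PySem.List.pyGetD myList i 0) (PySem.List.pyGetD myList (i + 1) 0)).symm

-- ===== VERDICT (by name: the statement is the Claim_ definition above) =====
theorem recursion_max_spec : Claim_equal_recursion_max := by
  intro myList i _ _
  unfold Spec_recursion_max
  exact rm_main myList (((myList.length : Int) - 1 - i).toNat) i le_rfl
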